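-- pv_equiv track=rewrite | github.com/ketvor/telephonebook | trjara.py | index_containing_substring
-- ===== SOURCE A (Python) =====
-- def index_containing_substring(the_list, substring):
--     lines = []
--     idx = -1
--     for i, s in enumerate(the_list):
--         if substring in s.lower():
--             if (i//11) > idx :
--                 idx = i//11
--
--                 lines.append(idx)
--
--
--     return lines
-- ===== SOURCE B (Python) =====
-- def index_containing_substring(the_list, substring):
--     blocks = {i // 11 for i, s in enumerate(the_list) if substring in s.lower()}
--     return sorted(blocks)
-- ===== Notes on version B (the rewrite author's own statement) =====
-- stated objective: simpler
-- what changed: Replaces the running-max scalar with guarded append by a set comprehension of block indices i//11 plus a final sort; equal because i//11 is monotone in i, so A's output is already the sorted distinct block list.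
import Mathlib
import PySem

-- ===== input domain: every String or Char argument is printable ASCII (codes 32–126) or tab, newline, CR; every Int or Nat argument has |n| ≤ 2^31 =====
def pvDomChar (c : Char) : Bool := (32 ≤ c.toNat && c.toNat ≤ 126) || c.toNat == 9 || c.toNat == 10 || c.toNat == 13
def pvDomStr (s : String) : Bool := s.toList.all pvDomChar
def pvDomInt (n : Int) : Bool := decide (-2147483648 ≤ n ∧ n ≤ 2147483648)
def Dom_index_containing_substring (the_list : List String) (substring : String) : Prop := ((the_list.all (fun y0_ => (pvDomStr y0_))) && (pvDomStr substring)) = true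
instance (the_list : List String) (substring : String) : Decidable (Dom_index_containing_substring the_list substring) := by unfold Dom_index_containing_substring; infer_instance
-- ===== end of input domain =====

-- B replaces A's running-max scalar with guarded append by a set of block indices i//11 plus a final sort (simpler, same cost).

-- ===== PORT A =====
def index_containing_substring (the_list : List String) (substring : String) : List Int :=
  ((PySem.List.enumerate the_list).foldl
    (fun (st : List Int × Int) p =>
      if PySem.Str.isIn substring (PySem.Str.lower p.2) then
        if PySem.Int.floordiv p.1 11 > st.2 then
          (st.1 ++ [PySem.Int.floordiv p.1 11], PySem.Int.floordiv p.1 11)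
        else st
      else st)
    ([], -1)).1

-- ===== PORT B =====
def index_containing_substring_alt (the_list : List String) (substring : String) : List Int :=
  let blocks : PySem.Set Int := PySem.Set.ofList
    (((PySem.List.enumerate the_list).filter
        (fun p => PySem.Str.isIn substring (PySem.Str.lower p.2))).map
      (fun p => PySem.Int.floordiv p.1 11))
  PySem.List.sorted blocks (fun x => x) false

-- ===== PRECONDITION & SPEC =====
def Spec_index_containing_substring (the_list : List String) (substring : String) (out : List Int) : Prop := out = index_containing_substring_alt the_list substring
instance (the_list : List String) (substring : String) (out : List Int) : Decidable (Spec_index_containing_substring the_list substring out) := by unfold Spec_index_containing_substring; infer_instance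

-- ===== CLAIM (what is proved, stated in full; the proofs are below) =====
def Claim_equal_index_containing_substring : Prop := ∀ (the_list : List String) (substring : String), Dom_index_containing_substring the_list substring → Spec_index_containing_substring the_list substring (index_containing_substring the_list substring)

-- ===== LEMMAS AND PROOFS =====

-- A's guarded-append loop over a ≤-sorted value list is exactly the ordered set-insertion fold,
-- and the result stays strictly increasing.
theorem foldA_eq_setFold (m : List Int) : ∀ (lines : List Int) (idx : Int),
    m.Pairwise (· ≤ ·) → (∀ v ∈ m, idx ≤ v) →
    ((lines = [] ∧ ∀ v ∈ m, idx < v) ∨ (idx ∈ lines ∧ ∀ x ∈ lines, x ≤ idx)) →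
    lines.Pairwise (· < ·) →
    (m.foldl (fun (st : List Int × Int) v => if v > st.2 then (st.1 ++ [v], v) else st)
        (lines, idx)).1 = m.foldl PySem.Set.add lines
    ∧ (m.foldl PySem.Set.add lines).Pairwise (· < ·) := by
  induction m with
  | nil => intro lines idx _ _ _ hpw; exact ⟨rfl, hpw⟩
  | cons v rest ih =>
    intro lines idx hle hidx hinv hpw
    have hvnotin : v > idx → v ∉ lines := by
      intro hgt hmem
      rcases hinv with ⟨hnil, _⟩ | ⟨_, hub⟩
      · simp [hnil] at hmem
      · exact absurd (hub v hmem) (by omega)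
    by_cases hgt : v > idx
    · have hnotin := hvnotin hgt
      have hadd : PySem.Set.add lines v = lines ++ [v] := by
        simp [PySem.Set.add, PySem.Set.contains]
        intro h; exact absurd h hnotin
      simp only [List.foldl_cons, if_pos hgt, hadd]
      apply ih (lines ++ [v]) v
      · exact hle.of_cons
      · intro w hw; exact (List.pairwise_cons.mp hle).1 w hw
      · right
        constructor
        · simp
        · intro x hx
          rcases List.mem_append.mp hx with hx | hx
          · rcases hinv with ⟨hnil, _⟩ | ⟨_, hub⟩
            · simp [hnil] at hx
            · have := hub x hx; omega
          · simp at hx; omega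
      · rw [List.pairwise_append]
        refine ⟨hpw, by simp, ?_⟩
        intro x hx y hy
        simp at hy; subst hy
        rcases hinv with ⟨hnil, _⟩ | ⟨_, hub⟩
        · simp [hnil] at hx
        · have := hub x hx; omega
    · -- v ≤ idx; with idx ≤ v this forces v = idx ∈ lines
      have hvle : idx ≤ v := hidx v (by simp)
      have hveq : v = idx := by omega
      rcases hinv with ⟨_, hlt⟩ | ⟨hmem, hub⟩
      · exact absurd (hlt v (by simp)) (by omega)
      · have hadd : PySem.Set.add lines v = lines := by
          simp [PySem.Set.add, PySem.Set.contains]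
          rw [hveq]; exact hmem
        simp only [List.foldl_cons, if_neg hgt, hadd]
        apply ih lines idx
        · exact hle.of_cons
        · intro w hw; exact le_trans hvle ((List.pairwise_cons.mp hle).1 w hw)
        · exact Or.inr ⟨hmem, hub⟩
        · exact hpw

theorem index_containing_substring_spec_aux (the_list : List String) (substring : String) :
    index_containing_substring the_list substring = index_containing_substring_alt the_list substring := by
  -- the ≤-sorted list of matched block indices
  set m : List Int :=
    ((PySem.List.enumerate the_list).filter
        (fun p => PySem.Str.isIn substring (PySem.Str.lower p.2))).map
      (fun p => PySem.Int.floordiv p.1 11) with hm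
  -- every matched index is ≥ 0, so every block value is > -1
  have hpos : ∀ v ∈ m, (-1 : Int) < v := by
    intro v hv
    rw [hm] at hv
    obtain ⟨p, hp, hpe⟩ := List.mem_map.mp hv
    obtain ⟨k, hk, hpk⟩ := (PySem.List.mem_enumerate_iff the_list 0 p).mp (List.mem_filter.mp hp).1
    subst hpe
    rw [hpk, PySem.Int.floordiv_eq_ediv_of_pos (by norm_num : (0:Int) < 11)]
    have : (0 : Int) ≤ (0 + (k : Int)) / 11 := Int.ediv_nonneg (by omega) (by omega)
    omega
  -- m is ≤-sorted: enumerate indices strictly increase, filter is a sublist, floordiv is monotone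
  have hsorted : m.Pairwise (· ≤ ·) := by
    rw [hm]
    apply List.Pairwise.map
    · intro p q (h : p.1 < q.1)
      rw [PySem.Int.floordiv_eq_ediv_of_pos (by norm_num : (0:Int) < 11),
          PySem.Int.floordiv_eq_ediv_of_pos (by norm_num : (0:Int) < 11)]
      exact Int.ediv_le_ediv (by omega) (le_of_lt h)
    · exact (PySem.List.pairwise_lt_enumerate (xs := the_list) (s := 0)).filter _
  have hmain := foldA_eq_setFold m [] (-1) hsorted
    (fun v hv => le_of_lt (hpos v hv)) (Or.inl ⟨rfl, hpos⟩) (by simp)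
  -- rewrite A's fused loop as a fold over m
  have hA : index_containing_substring the_list substring =
      (m.foldl (fun (st : List Int × Int) v => if v > st.2 then (st.1 ++ [v], v) else st)
        ([], -1)).1 := by
    unfold index_containing_substring
    rw [PySem.List.foldl_if_eq_foldl_filter, hm, List.foldl_map]
  have hofList : PySem.Set.ofList m = m.foldl PySem.Set.add [] := PySem.Set.ofList_eq_foldl m
  unfold index_containing_substring_alt
  rw [hA, hmain.1, ← hofList]
  have hpw : (PySem.Set.ofList m).Pairwise (fun a b : Int => a ≤ b) := by
    have := hofList ▸ hmain.2
    exact this.imp (by intro a b h; omega)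
  exact (PySem.List.sorted_eq_self_of_pairwise (PySem.Set.ofList m) (fun x => x) hpw).symm

-- ===== VERDICT (by name: the statement is the Claim_ definition above) =====
theorem index_containing_substring_spec : Claim_equal_index_containing_substring := by
  intro the_list substring _
  exact index_containing_substring_spec_aux the_list substring
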